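-- pv_equiv track=rewrite | github.com/JarodWellinghoff/ORTHANC-Plugin | src/python/patient_specific_calculation.py | max_consecutive_ones_2d
-- ===== SOURCE A (Python) =====
-- def max_consecutive_ones_2d(bool_array_2d):
--     """Find maximum consecutive ones in 2D array"""
--     max_consecutive = 0
--     for row in bool_array_2d:
--         max_count = 0
--         count = 0
--         for value in row:
--             if value:
--                 count += 1
--             else:
--                 max_count = max(max_count, count)
--                 count = 0
--         max_count = max(max_count, count)
--         max_consecutive = max(max_consecutive, max_count)
--     return max_consecutive
-- ===== SOURCE B (Python) =====
-- def max_consecutive_ones_2d(bool_array_2d):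
--     """Find maximum consecutive ones in 2D array"""
--     best = 0
--     for row in bool_array_2d:
--         cur = [bool(v) for v in row]
--         k = 0
--         while any(cur):
--             cur = [a and b for a, b in zip(cur, cur[1:])]
--             k += 1
--         best = max(best, k)
--     return best
-- ===== Notes on version B (the rewrite author's own statement) =====
-- stated objective: alternative
-- what changed: Replaces A's counter-with-reset scan by the shift-AND erosion algorithm: each row is repeatedly ANDed with itself shifted by one position, and the number of erosion steps until the row is all-False equals its longest run of Trues.
import Mathlib
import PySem

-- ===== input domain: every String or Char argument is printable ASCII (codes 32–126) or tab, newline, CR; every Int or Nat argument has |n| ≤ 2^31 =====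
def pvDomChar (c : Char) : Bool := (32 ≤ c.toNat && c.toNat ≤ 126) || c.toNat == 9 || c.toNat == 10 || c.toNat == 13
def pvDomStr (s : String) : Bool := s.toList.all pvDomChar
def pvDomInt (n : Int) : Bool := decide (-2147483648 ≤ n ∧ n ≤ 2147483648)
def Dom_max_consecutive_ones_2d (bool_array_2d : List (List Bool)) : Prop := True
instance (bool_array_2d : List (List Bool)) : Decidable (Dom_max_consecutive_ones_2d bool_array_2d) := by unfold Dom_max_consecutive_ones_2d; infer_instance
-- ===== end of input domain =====

-- B replaces A's counter-with-reset scan by shift-AND erosion (count erosions until all-False); objective: alternative, not faster.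

-- ===== PORT A =====
-- A: outer loop keeps max_consecutive; inner loop keeps (max_count, count) with reset on False.
def max_consecutive_ones_2d (bool_array_2d : List (List Bool)) : Int :=
  bool_array_2d.foldl
    (fun max_consecutive row =>
      let p := row.foldl
        (fun (s : Int × Int) value =>
          if value then (s.1, s.2 + 1) else (max s.1 s.2, 0))
        (0, 0)
      max max_consecutive (max p.1 p.2))
    0

-- ===== PORT B =====
-- cur = [a and b for a, b in zip(cur, cur[1:])]  (zip truncates, like zipWith)
def shiftAnd (xs : List Bool) : List Bool := List.zipWith and xs xs.tail

-- the while-loop: erode until any(cur) is False, counting steps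
def rowErode (xs : List Bool) : Int :=
  if xs.any id then 1 + rowErode (shiftAnd xs) else 0
termination_by xs.length
decreasing_by
  rename_i h
  have hne : xs ≠ [] := by rintro rfl; simp at h
  cases xs with
  | nil => exact absurd rfl hne
  | cons a t =>
    simp only [shiftAnd, List.tail_cons, List.length_zipWith, List.length_cons]
    omega

def max_consecutive_ones_2d_alt (bool_array_2d : List (List Bool)) : Int :=
  bool_array_2d.foldl (fun best row => max best (rowErode row)) 0

-- ===== PRECONDITION & SPEC =====
def Spec_max_consecutive_ones_2d (bool_array_2d : List (List Bool)) (out : Int) : Prop := out = max_consecutive_ones_2d_alt bool_array_2d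
instance (bool_array_2d : List (List Bool)) (out : Int) : Decidable (Spec_max_consecutive_ones_2d bool_array_2d out) := by unfold Spec_max_consecutive_ones_2d; infer_instance

-- ===== CLAIM (what is proved, stated in full; the proofs are below) =====
def Claim_equal_max_consecutive_ones_2d : Prop := ∀ (bool_array_2d : List (List Bool)), Dom_max_consecutive_ones_2d bool_array_2d → Spec_max_consecutive_ones_2d bool_array_2d (max_consecutive_ones_2d bool_array_2d)

-- ===== LEMMAS AND PROOFS =====

-- Canonical "longest run of Trues, with c Trues already pending".
def maxRun (c : Int) : List Bool → Int
  | [] => c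
  | true :: xs => maxRun (c + 1) xs
  | false :: xs => max c (maxRun 0 xs)

theorem maxRun_ge (xs : List Bool) (c : Int) : c ≤ maxRun c xs := by
  induction xs generalizing c with
  | nil => exact le_rfl
  | cons x xs ih =>
    cases x with
    | true => have := ih (c + 1); simp [maxRun]; omega
    | false => simp [maxRun]

theorem maxRun_nonneg (xs : List Bool) (c : Int) (hc : 0 ≤ c) : 0 ≤ maxRun c xs :=
  le_trans hc (maxRun_ge xs c)

-- A's inner fold computes maxRun.
theorem arow_eq_maxRun (row : List Bool) (m c : Int) :
    max (row.foldl
        (fun (s : Int × Int) value =>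
          if value then (s.1, s.2 + 1) else (max s.1 s.2, 0)) (m, c)).1
      (row.foldl
        (fun (s : Int × Int) value =>
          if value then (s.1, s.2 + 1) else (max s.1 s.2, 0)) (m, c)).2
    = max m (maxRun c row) := by
  induction row generalizing m c with
  | nil => simp [maxRun]
  | cons x xs ih =>
    cases x with
    | true => simpa [maxRun, List.foldl_cons] using ih m (c + 1)
    | false =>
      have := ih (max m c) 0
      simp only [List.foldl_cons, Bool.false_eq_true, ite_false]
      rw [this, maxRun]
      omega

-- erosion of a False-headed list: the leading False contributes nothing
theorem shiftAnd_false_cons (r : List Bool) :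
    maxRun 0 (shiftAnd (false :: r)) = maxRun 0 (shiftAnd r) := by
  cases r with
  | nil => simp [shiftAnd]
  | cons x r' =>
    have h : (0 : Int) ≤ maxRun 0 (List.zipWith and (x :: r') r') :=
      maxRun_nonneg _ 0 le_rfl
    simp only [shiftAnd, List.tail_cons, List.zipWith_cons_cons, Bool.false_and, maxRun]
    exact max_eq_right h

-- joint erosion lemma, by strong induction on length:
-- G: maxRun 0 (shiftAnd xs) = max 0 (maxRun 0 xs - 1)
-- P: for true-headed lists, with pending count c
theorem erode_joint : ∀ (n : Nat) (xs : List Bool), xs.length ≤ n →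
    (maxRun 0 (shiftAnd xs) = max 0 (maxRun 0 xs - 1)) ∧
    (∀ c : Int, 0 ≤ c →
      maxRun c (shiftAnd (true :: xs)) = max c (maxRun (c + 1) xs - 1)) := by
  intro n
  induction n with
  | zero =>
    intro xs hxs
    have : xs = [] := List.length_eq_zero_iff.mp (Nat.le_zero.mp hxs)
    subst this
    constructor
    · simp [shiftAnd, maxRun]
    · intro c hc; simp [shiftAnd, maxRun]
  | succ n ih =>
    intro xs hxs
    constructor
    · -- G xs
      cases xs with
      | nil => simp [shiftAnd, maxRun]
      | cons x r =>
        have hr : r.length ≤ n := by simp at hxs; omega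
        cases x with
        | true =>
          have hP := (ih r hr).2 0 le_rfl
          rw [hP, show maxRun 0 (true :: r) = maxRun (0 + 1) r from rfl]
        | false =>
          have hG := (ih r hr).1
          have h0 := maxRun_nonneg r 0 le_rfl
          rw [shiftAnd_false_cons, hG,
            show maxRun 0 (false :: r) = max 0 (maxRun 0 r) from rfl]
          omega
    · -- P xs
      intro c hc
      cases xs with
      | nil => simp [shiftAnd, maxRun]
      | cons x r =>
        have hr : r.length ≤ n := by simp at hxs; omega
        cases x with
        | true =>
          have hP := (ih r hr).2 (c + 1) (by omega)
          have hge := maxRun_ge r (c + 1 + 1)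
          have hL : maxRun c (shiftAnd (true :: true :: r))
              = maxRun (c + 1) (shiftAnd (true :: r)) := by
            simp [shiftAnd, maxRun]
          rw [hL, hP, show maxRun (c + 1) (true :: r) = maxRun (c + 1 + 1) r from rfl]
          omega
        | false =>
          have hG := (ih r hr).1
          have h0 := maxRun_nonneg r 0 le_rfl
          have hL : maxRun c (shiftAnd (true :: false :: r))
              = max c (maxRun 0 (shiftAnd (false :: r))) := by
            simp [shiftAnd, maxRun]
          rw [hL, shiftAnd_false_cons, hG,
            show maxRun (c + 1) (false :: r) = max (c + 1) (maxRun 0 r) from rfl]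
          omega

theorem erode_step (xs : List Bool) :
    maxRun 0 (shiftAnd xs) = max 0 (maxRun 0 xs - 1) :=
  (erode_joint xs.length xs le_rfl).1

theorem maxRun_pos_of_any (xs : List Bool) (h : xs.any id = true) :
    1 ≤ maxRun 0 xs := by
  induction xs with
  | nil => simp at h
  | cons x r ih =>
    cases x with
    | true => have := maxRun_ge r 1; simpa [maxRun] using this
    | false =>
      simp only [List.any_cons, id] at h
      have := ih (by simpa using h)
      simp [maxRun]; omega

theorem maxRun_zero_of_not_any (xs : List Bool) (h : ¬ xs.any id = true) :
    maxRun 0 xs = 0 := by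
  induction xs with
  | nil => rfl
  | cons x r ih =>
    cases x with
    | true => simp at h
    | false =>
      simp only [List.any_cons, id] at h
      rw [maxRun, ih (by simpa using h)]
      simp

-- B's while loop computes maxRun 0.
theorem rowErode_eq_maxRun (xs : List Bool) : rowErode xs = maxRun 0 xs := by
  induction xs using rowErode.induct with
  | case1 xs h ih =>
    rw [rowErode, if_pos h, ih, erode_step]
    have := maxRun_pos_of_any xs h
    omega
  | case2 xs h =>
    rw [rowErode, if_neg h, maxRun_zero_of_not_any xs h]

-- Outer loops agree.
theorem outer_eq (l : List (List Bool)) : ∀ (a : Int),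
    l.foldl
      (fun max_consecutive row =>
        let p := row.foldl
          (fun (s : Int × Int) value =>
            if value then (s.1, s.2 + 1) else (max s.1 s.2, 0)) (0, 0)
        max max_consecutive (max p.1 p.2)) a
    = l.foldl (fun best row => max best (rowErode row)) a := by
  induction l with
  | nil => intro a; rfl
  | cons row l ih =>
    intro a
    simp only [List.foldl_cons, arow_eq_maxRun row 0 0, rowErode_eq_maxRun row]
    rw [max_eq_right (maxRun_nonneg row 0 le_rfl), ih]

-- ===== VERDICT (by name: the statement is the Claim_ definition above) =====
theorem max_consecutive_ones_2d_spec : Claim_equal_max_consecutive_ones_2d := by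
  intro l _
  unfold Spec_max_consecutive_ones_2d max_consecutive_ones_2d max_consecutive_ones_2d_alt
  exact outer_eq l 0
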